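-- pv_equiv track=rewrite | github.com/migueltillisjr/e3-ui | cicd/tools/target_group_deploy.py | next_free_priority
-- ===== SOURCE A (Python) =====
-- def next_free_priority(rules):
--     used = set()
--     for r in rules:
--         p = r.get("Priority")
--         if p and p.isdigit():
--             used.add(int(p))
--     p = 10
--     while p in used:
--         p += 10
--     return p
-- ===== SOURCE B (Python) =====
-- def next_free_priority(rules):
--     vals = []
--     for r in rules:
--         p = r.get("Priority")
--         if p and p.isdigit():
--             vals.append(int(p))
--     expected = 10
--     for v in sorted(set(vals)):
--         if v < expected:
--             continue
--         if v == expected: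
--             expected += 10
--         else:
--             break
--     return expected
-- ===== Notes on version B (the rewrite author's own statement) =====
-- stated objective: alternative
-- what changed: Replaces the unbounded while-loop that probes the set for 10,20,30,... with a single gap-scan over the sorted deduplicated priorities that returns the first missing multiple of 10.
import Mathlib
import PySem

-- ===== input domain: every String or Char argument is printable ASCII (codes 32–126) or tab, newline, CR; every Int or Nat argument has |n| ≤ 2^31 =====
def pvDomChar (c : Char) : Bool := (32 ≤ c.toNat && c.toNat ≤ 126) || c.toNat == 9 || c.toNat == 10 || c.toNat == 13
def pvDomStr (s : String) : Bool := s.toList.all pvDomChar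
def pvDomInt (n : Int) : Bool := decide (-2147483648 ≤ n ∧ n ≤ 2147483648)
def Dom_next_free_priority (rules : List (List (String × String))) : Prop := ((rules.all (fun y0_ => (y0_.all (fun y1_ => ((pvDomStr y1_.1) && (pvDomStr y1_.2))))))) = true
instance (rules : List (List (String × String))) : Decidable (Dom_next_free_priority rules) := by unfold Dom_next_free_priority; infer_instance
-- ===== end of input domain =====

-- B replaces A's while-loop membership probing (10, 20, 30, … in used) by a single
-- gap-scan over the sorted deduplicated priorities; same return value, similar cost.

-- ===== PORT A =====
-- the `while p in used: p += 10` loop; fuel `|used| + 1` always suffices: the probes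
-- are distinct, so a set of n elements can absorb at most n of them
def nfpLoop (used : PySem.Set Int) : Int → Nat → Int
  | p, 0 => p
  | p, fuel + 1 => if PySem.Set.contains used p then nfpLoop used (p + 10) fuel else p

def next_free_priority (rules : List (List (String × String))) : Int :=
  let used : PySem.Set Int :=
    rules.foldl (fun used r =>
      match (PySem.Dict.mk r).get? "Priority" with
      | some p =>
          if p != "" && PySem.Str.strIsdigit p then
            PySem.Set.add used ((PySem.Int.ofStr? p).getD 0)
          else used
      | none => used) []
  nfpLoop used 10 (used.length + 1)

-- ===== PORT B =====
-- `for v in sorted(set(vals)): …` with continue / increment / break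
def nfpScan : List Int → Int → Int
  | [], e => e
  | v :: S, e => if v < e then nfpScan S e else if v = e then nfpScan S (e + 10) else e

def next_free_priority_alt (rules : List (List (String × String))) : Int :=
  let vals : List Int :=
    rules.foldl (fun vals r =>
      match (PySem.Dict.mk r).get? "Priority" with
      | some p =>
          if p != "" && PySem.Str.strIsdigit p then
            vals ++ [(PySem.Int.ofStr? p).getD 0]
          else vals
      | none => vals) []
  nfpScan (PySem.List.sorted (PySem.Set.ofList vals) (fun x => x) false) 10

-- ===== PRECONDITION & SPEC =====
def Spec_next_free_priority (rules : List (List (String × String))) (out : Int) : Prop := out = next_free_priority_alt rules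
instance (rules : List (List (String × String))) (out : Int) : Decidable (Spec_next_free_priority rules out) := by unfold Spec_next_free_priority; infer_instance

-- ===== CLAIM (what is proved, stated in full; the proofs are below) =====
def Claim_equal_next_free_priority : Prop := ∀ (rules : List (List (String × String))), Dom_next_free_priority rules → Spec_next_free_priority rules (next_free_priority rules)

-- ===== LEMMAS AND PROOFS =====

-- A's set accumulator is `set(vals)` for B's list accumulator
theorem nfp_build (rules : List (List (String × String))) (l : List Int) :
    rules.foldl (fun used r =>
      match (PySem.Dict.mk r).get? "Priority" with
      | some p =>
          if p != "" && PySem.Str.strIsdigit p then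
            PySem.Set.add used ((PySem.Int.ofStr? p).getD 0)
          else used
      | none => used) (PySem.Set.ofList l)
    = PySem.Set.ofList (rules.foldl (fun vals r =>
      match (PySem.Dict.mk r).get? "Priority" with
      | some p =>
          if p != "" && PySem.Str.strIsdigit p then
            vals ++ [(PySem.Int.ofStr? p).getD 0]
          else vals
      | none => vals) l) := by
  induction rules generalizing l with
  | nil => rfl
  | cons r rs ih =>
      simp only [List.foldl_cons]
      cases h : (PySem.Dict.mk r).get? "Priority" with
      | none => exact ih l
      | some p =>
          by_cases hp : (p != "" && PySem.Str.strIsdigit p) = true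
          · simp only [hp, if_true]
            rw [show PySem.Set.add (PySem.Set.ofList l) ((PySem.Int.ofStr? p).getD 0)
                  = PySem.Set.ofList (l ++ [(PySem.Int.ofStr? p).getD 0]) by
                simp [PySem.Set.ofList_eq_foldl, List.foldl_append]]
            exact ih _
          · simp only [hp]
            exact ih l

-- the loop only looks at membership in the set
theorem nfpLoop_congr (fuel : Nat) (l1 l2 : List Int) (h : ∀ q : Int, q ∈ l1 ↔ q ∈ l2) :
    ∀ e : Int, nfpLoop l1 e fuel = nfpLoop l2 e fuel := by
  induction fuel with
  | zero => intro e; rfl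
  | succ n ih =>
      intro e
      have hc : PySem.Set.contains l1 e = PySem.Set.contains l2 e := by
        rw [Bool.eq_iff_iff, PySem.Set.contains_iff, PySem.Set.contains_iff]
        exact h e
      simp only [nfpLoop, hc]
      split_ifs with hm
      · exact ih (e + 10)
      · rfl

-- probes only grow, so an element below the probe never matters
theorem nfpLoop_skip (fuel : Nat) (S : List Int) (v : Int) :
    ∀ e : Int, v < e → nfpLoop (v :: S) e fuel = nfpLoop S e fuel := by
  induction fuel with
  | zero => intro e _; rfl
  | succ n ih =>
      intro e hv
      have hc : PySem.Set.contains (v :: S) e = PySem.Set.contains S e := by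
        rw [Bool.eq_iff_iff, PySem.Set.contains_iff, PySem.Set.contains_iff, List.mem_cons]
        have hne : e ≠ v := by omega
        simp [hne]
      simp only [nfpLoop, hc]
      split_ifs with hm
      · exact ih (e + 10) (by omega)
      · rfl

-- on a strictly sorted list, the membership loop is the gap-scan
theorem nfpLoop_eq_scan (S : List Int) (hS : S.Pairwise (· < ·)) :
    ∀ (fuel : Nat) (e : Int), S.length + 1 ≤ fuel → nfpLoop S e fuel = nfpScan S e := by
  induction S with
  | nil =>
      intro fuel e hf
      match fuel, hf with
      | n + 1, _ =>
        have hc : PySem.Set.contains ([] : PySem.Set Int) e = false := by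
          rw [Bool.eq_false_iff]
          intro hb
          simpa using (PySem.Set.contains_iff _ _).mp hb
        simp only [nfpLoop, hc, Bool.false_eq_true, if_false, nfpScan]
  | cons v S ih =>
      intro fuel e hf
      obtain ⟨n, rfl⟩ : ∃ n, fuel = n + 1 := ⟨fuel - 1, by omega⟩
      rcases List.pairwise_cons.mp hS with ⟨hv, hS'⟩
      by_cases h1 : v < e
      · rw [show nfpScan (v :: S) e = nfpScan S e from by simp [nfpScan, h1]]
        rw [nfpLoop_skip (n + 1) S v e h1]
        exact ih hS' (n + 1) e (by simp only [List.length_cons] at hf; omega)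
      · by_cases h2 : v = e
        · subst h2
          have hc : PySem.Set.contains (v :: S) v = true :=
            (PySem.Set.contains_iff _ _).mpr (List.mem_cons_self)
          simp only [nfpLoop, hc, if_true]
          rw [nfpLoop_skip n S v (v + 10) (by omega)]
          rw [show nfpScan (v :: S) v = nfpScan S (v + 10) from by simp [nfpScan]]
          exact ih hS' n (v + 10) (by simp only [List.length_cons] at hf; omega)
        · have h3 : e < v := by omega
          have hne : e ∉ v :: S := by
            intro hm
            rcases List.mem_cons.mp hm with rfl | hm
            · omega
            · have := hv e hm; omega
          have hc : PySem.Set.contains (v :: S) e = false := by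
            rw [Bool.eq_false_iff]
            intro hb
            exact hne ((PySem.Set.contains_iff _ _).mp hb)
          rw [show nfpScan (v :: S) e = e from by simp [nfpScan, h1, h2]]
          simp only [nfpLoop, hc, Bool.false_eq_true, if_false]

-- ===== VERDICT (by name: the statement is the Claim_ definition above) =====
theorem next_free_priority_spec : Claim_equal_next_free_priority := by
  intro rules _
  simp only [Spec_next_free_priority, next_free_priority, next_free_priority_alt]
  have hbuild := nfp_build rules []
  rw [show PySem.Set.ofList ([] : List Int) = ([] : List Int) from rfl] at hbuild
  rw [hbuild]
  generalize (rules.foldl (fun vals r =>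
      match (PySem.Dict.mk r).get? "Priority" with
      | some p =>
          if p != "" && PySem.Str.strIsdigit p then
            vals ++ [(PySem.Int.ofStr? p).getD 0]
          else vals
      | none => vals) ([] : List Int)) = vals
  have hmem : ∀ q : Int, q ∈ PySem.Set.ofList vals ↔
      q ∈ PySem.List.sorted (PySem.Set.ofList vals) (fun x => x) false :=
    fun q => (PySem.List.mem_sorted _ _ _ q).symm
  rw [nfpLoop_congr _ _ _ hmem 10]
  rw [show (PySem.Set.ofList vals).length
        = (PySem.List.sorted (PySem.Set.ofList vals) (fun x => x) false).length from
      (PySem.List.length_sorted _ _ _).symm]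
  exact nfpLoop_eq_scan _ (PySem.List.sorted_ofList_pairwise_lt vals) _ 10 (le_refl _)
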